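-- pv_equiv track=rewrite | github.com/NDonatucci/donut_tests | donut_longest_run_within_block_test.py | calculate_d
-- ===== SOURCE A (Python) =====
-- def get_d(matrix, sigma, n, k):
--     if n==1 and k==0:
--         return sigma-1
--     if n==2 and k==0:
--         return (sigma-1)**2
--     if k==n-1:
--         return 0
--     if k==0:
--         return (sigma-1)**n
--
--     return matrix[n,k]
--
-- def calculate_d(n, sigma):
--     matrix = dict()
--     for nn in range(3, n+1, 1):
--         for kk in range(nn-1):
--             matrix[nn, kk] = 0
--             for j in range(1, nn - kk + 1, 1):
--                 for s in range(0, min(kk-1, j-2)+1, 1):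
--                     for t in range(0, min(kk, nn-j-kk)+1, 1):
--                         matrix[nn,kk]=matrix[nn,kk]+get_d(matrix, sigma, j-1, s)*get_d(matrix, sigma, nn-j+1-kk, t)
--     res = list()
--     for kk in range(n):
--         res.append(get_d(matrix, sigma, n, kk))
--     return res
-- ===== SOURCE B (Python) =====
-- def calculate_d(n, sigma):
--     # Factor the independent s- and t-sums and precompute row prefix sums:
--     # O(n^3) instead of A's O(n^5).
--     rows = {}   # m -> [value(m, k) for k in range(m)]
--     prefs = {}  # m -> prefix sums of rows[m]
--
--     def make_row(m, interior):
--         if m == 1: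
--             row = [sigma - 1]
--         elif m == 2:
--             row = [(sigma - 1) ** 2, 0]
--         else:
--             row = [(sigma - 1) ** m] + interior + [0]
--         acc = 0
--         pr = []
--         for v in row:
--             acc += v
--             pr.append(acc)
--         rows[m] = row
--         prefs[m] = pr
--
--     def P(m, c):
--         # sum of value(m, k) for k = 0..c (c may be negative -> 0)
--         if c < 0:
--             return 0
--         return prefs[m][c]
--
--     if n >= 1:
--         make_row(1, None)
--     if n >= 2:
--         make_row(2, None)
--     for nn in range(3, n + 1):
--         interior = []
--         for kk in range(1, nn - 1):
--             total = 0
--             for j in range(2, nn - kk + 1):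
--                 m2 = nn - j + 1 - kk
--                 total += P(j - 1, min(kk - 1, j - 2)) * P(m2, min(kk, m2 - 1))
--             interior.append(total)
--         make_row(nn, interior)
--     if n <= 0:
--         return []
--     return list(rows[n])
-- ===== Notes on version B (the rewrite author's own statement) =====
-- stated objective: faster
-- what changed: Factorized the independent s- and t-sums of the DP recurrence into a product of two prefix sums, precomputed per row, turning A's quintuple loop into a triple loop.
import Mathlib
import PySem

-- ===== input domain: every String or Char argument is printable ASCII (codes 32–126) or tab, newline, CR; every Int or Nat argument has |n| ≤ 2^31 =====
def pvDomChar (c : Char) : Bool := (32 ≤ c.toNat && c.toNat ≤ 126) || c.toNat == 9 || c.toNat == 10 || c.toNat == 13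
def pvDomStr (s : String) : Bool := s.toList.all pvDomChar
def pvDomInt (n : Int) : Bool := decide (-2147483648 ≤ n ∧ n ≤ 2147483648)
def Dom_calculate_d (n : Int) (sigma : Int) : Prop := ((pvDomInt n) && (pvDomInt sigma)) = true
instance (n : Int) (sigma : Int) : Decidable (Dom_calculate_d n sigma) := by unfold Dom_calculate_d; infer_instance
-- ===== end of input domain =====

-- B replaces A's quintuple DP loop by factorized prefix-sum products (O(n^3) vs O(n^5); measurably faster).

-- ===== PORT A =====
-- get_d: '(sigma-1)**n' ported as '(sigma-1)^n.toNat' — exact, since every call from calculate_d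
-- reaching the k==0 branch has n ≥ 0; 'matrix[n,k]' ported as getD with default 0 — the key is
-- always present at every call site from calculate_d, so Python's KeyError is unreachable.
def get_d (matrix : PySem.Dict (Int × Int) Int) (sigma : Int) (n : Int) (k : Int) : Int :=
  if n = 1 ∧ k = 0 then sigma - 1
  else if n = 2 ∧ k = 0 then (sigma - 1) ^ 2
  else if k = n - 1 then 0
  else if k = 0 then (sigma - 1) ^ n.toNat
  else matrix.getD (n, k) 0

def calculate_d (n : Int) (sigma : Int) : List Int :=
  let matrix : PySem.Dict (Int × Int) Int :=
    (PySem.List.pyRange 3 (n + 1) 1).foldl (fun matrix nn =>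
      (PySem.List.pyRange 0 (nn - 1) 1).foldl (fun matrix kk =>
        let matrix := matrix.insert (nn, kk) 0
        (PySem.List.pyRange 1 (nn - kk + 1) 1).foldl (fun matrix j =>
          (PySem.List.pyRange 0 (min (kk - 1) (j - 2) + 1) 1).foldl (fun matrix s =>
            (PySem.List.pyRange 0 (min kk (nn - j - kk) + 1) 1).foldl (fun matrix t =>
              matrix.insert (nn, kk)
                (matrix.getD (nn, kk) 0 +
                  get_d matrix sigma (j - 1) s * get_d matrix sigma (nn - j + 1 - kk) t))
              matrix) matrix) matrix) matrix) PySem.Dict.empty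
  (PySem.List.pyRange 0 n 1).foldl (fun res kk => res ++ [get_d matrix sigma n kk]) []

-- ===== PORT B =====
-- B-side helpers (transliterations of Source B's make_row and P; '**' again via toNat, exponent ≥ 3
-- at its only non-literal use; 'prefs[m][c]' via getD/pyGetD with defaults — at every call site
-- the key/index is in range).
def pv_row (sigma : Int) (m : Int) (interior : List Int) : List Int :=
  if m = 1 then [sigma - 1]
  else if m = 2 then [(sigma - 1) ^ 2, 0]
  else (sigma - 1) ^ m.toNat :: (interior ++ [0])

def pv_prefix (row : List Int) : List Int :=
  (row.foldl (fun (p : Int × List Int) v => (p.1 + v, p.2 ++ [p.1 + v])) (0, [])).2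

def pv_makeRow (sigma : Int) (st : PySem.Dict Int (List Int) × PySem.Dict Int (List Int))
    (m : Int) (interior : List Int) :
    PySem.Dict Int (List Int) × PySem.Dict Int (List Int) :=
  let row := pv_row sigma m interior
  (st.1.insert m row, st.2.insert m (pv_prefix row))

def pv_P (prefs : PySem.Dict Int (List Int)) (m : Int) (c : Int) : Int :=
  if c < 0 then 0 else PySem.List.pyGetD (prefs.getD m []) c 0

def calculate_d_alt (n : Int) (sigma : Int) : List Int :=
  let st0 : PySem.Dict Int (List Int) × PySem.Dict Int (List Int) :=
    (PySem.Dict.empty, PySem.Dict.empty)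
  let st1 := if 1 ≤ n then pv_makeRow sigma st0 1 [] else st0
  let st2 := if 2 ≤ n then pv_makeRow sigma st1 2 [] else st1
  let st := (PySem.List.pyRange 3 (n + 1) 1).foldl (fun st nn =>
    let interior := (PySem.List.pyRange 1 (nn - 1) 1).foldl (fun interior kk =>
      let total := (PySem.List.pyRange 2 (nn - kk + 1) 1).foldl (fun total j =>
        let m2 := nn - j + 1 - kk
        total + pv_P st.2 (j - 1) (min (kk - 1) (j - 2)) * pv_P st.2 m2 (min kk (m2 - 1))) 0
      interior ++ [total]) []
    pv_makeRow sigma st nn interior) st2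
  if n ≤ 0 then [] else st.1.getD n []

-- ===== PRECONDITION & SPEC =====
def Spec_calculate_d (n : Int) (sigma : Int) (out : List Int) : Prop := out = calculate_d_alt n sigma
instance (n : Int) (sigma : Int) (out : List Int) : Decidable (Spec_calculate_d n sigma out) := by unfold Spec_calculate_d; infer_instance

-- ===== CLAIM (what is proved, stated in full; the proofs are below) =====
def Claim_equal_calculate_d : Prop := ∀ (n : Int) (sigma : Int), Dom_calculate_d n sigma → Spec_calculate_d n sigma (calculate_d n sigma)

-- ===== LEMMAS AND PROOFS =====

-- Abbreviation for the dictionary types used below.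
-- (A-side state) PySem.Dict (Int × Int) Int ; (B-side state) PySem.Dict Int (List Int)

-- get_d reads the dict only at key (m,k)
theorem pv_get_d_congr (d d' : PySem.Dict (Int × Int) Int) (σ m k : Int)
    (h : d.getD (m, k) 0 = d'.getD (m, k) 0) : get_d d σ m k = get_d d' σ m k := by
  unfold get_d; split_ifs <;> first | rfl | exact h

theorem pv_get_d_insert_ne (d : PySem.Dict (Int × Int) Int) (key : Int × Int) (v : Int)
    (σ m k : Int) (h : (m, k) ≠ key) : get_d (d.insert key v) σ m k = get_d d σ m k :=
  by
  exact pv_get_d_congr _ _ _ _ _ (PySem.Dict.getD_insert_of_ne d v 0 h)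

-- the A-side inner accumulation loops, collapsed: a fold whose body adds F to the entry at `key`
theorem pv_fold_collapse {α : Type} (key : Int × Int) (l : List α)
    (G : PySem.Dict (Int × Int) Int → α → PySem.Dict (Int × Int) Int)
    (F : PySem.Dict (Int × Int) Int → α → Int)
    (hG : ∀ (e : PySem.Dict (Int × Int) Int) (b : Int) (x), x ∈ l →
      G (e.insert key b) x = e.insert key (b + F (e.insert key b) x))
    (hF : ∀ (d : PySem.Dict (Int × Int) Int) (v : Int) (x), x ∈ l →
      F (d.insert key v) x = F d x)
    (d0 : PySem.Dict (Int × Int) Int) (a : Int) :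
    l.foldl G (d0.insert key a) = d0.insert key (a + (l.map (F (d0.insert key a))).sum) := by
  induction l generalizing a with
  | nil => simp
  | cons x xs ih =>
    have hGx := hG d0 a x (by simp)
    have hstep : G (d0.insert key a) x = d0.insert key (a + F (d0.insert key a) x) := hGx
    have ihx := ih (fun e b y hy => hG e b y (by simp [hy])) (fun d v y hy => hF d v y (by simp [hy]))
      (a + F (d0.insert key a) x)
    calc (x :: xs).foldl G (d0.insert key a)
        = xs.foldl G (d0.insert key (a + F (d0.insert key a) x)) := by
          simp only [List.foldl_cons, hstep]
      _ = d0.insert key (a + F (d0.insert key a) x +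
            (xs.map (F (d0.insert key (a + F (d0.insert key a) x)))).sum) := ihx
      _ = d0.insert key (a + (((x :: xs).map (F (d0.insert key a)))).sum) := by
          have hmap : xs.map (F (d0.insert key (a + F (d0.insert key a) x)))
              = xs.map (F (d0.insert key a)) := by
            apply List.map_congr_left
            intro y hy
            rw [hF d0 (a + F (d0.insert key a) x) y (by simp [hy]),
                hF d0 a y (by simp [hy])]
          rw [hmap]
          simp [add_assoc]

-- the summand functions of A's three nested loops (reading a frozen dict d)
def pvFt (d : PySem.Dict (Int × Int) Int) (σ nn kk j s : Int) : Int → Int :=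
  fun t => get_d d σ (j - 1) s * get_d d σ (nn - j + 1 - kk) t
def pvFs (d : PySem.Dict (Int × Int) Int) (σ nn kk j : Int) : Int → Int :=
  fun s => ((PySem.List.pyRange 0 (min kk (nn - j - kk) + 1) 1).map (pvFt d σ nn kk j s)).sum
def pvFj (d : PySem.Dict (Int × Int) Int) (σ nn kk : Int) : Int → Int :=
  fun j => ((PySem.List.pyRange 0 (min (kk - 1) (j - 2) + 1) 1).map (pvFs d σ nn kk j)).sum
def pvSum (d : PySem.Dict (Int × Int) Int) (σ nn kk : Int) : Int :=
  ((PySem.List.pyRange 1 (nn - kk + 1) 1).map (pvFj d σ nn kk)).sum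

-- the body of A's kk-loop, as a named function (definitionally the port's lambda)
def pvA_body (σ nn : Int) : PySem.Dict (Int × Int) Int → Int → PySem.Dict (Int × Int) Int :=
  fun matrix kk =>
    (PySem.List.pyRange 1 (nn - kk + 1) 1).foldl (fun matrix j =>
      (PySem.List.pyRange 0 (min (kk - 1) (j - 2) + 1) 1).foldl (fun matrix s =>
        (PySem.List.pyRange 0 (min kk (nn - j - kk) + 1) 1).foldl (fun matrix t =>
          matrix.insert (nn, kk)
            (matrix.getD (nn, kk) 0 +
              get_d matrix σ (j - 1) s * get_d matrix σ (nn - j + 1 - kk) t))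
          matrix) matrix) (matrix.insert (nn, kk) 0)

def pvA_outer (σ : Int) : PySem.Dict (Int × Int) Int → Int → PySem.Dict (Int × Int) Int :=
  fun matrix nn => (PySem.List.pyRange 0 (nn - 1) 1).foldl (pvA_body σ nn) matrix

theorem pv_ne1 (nn kk j s : Int) (h2 : j ≤ nn - kk) (hkk : 1 ≤ kk) :
    ((j - 1, s) : Int × Int) ≠ (nn, kk) := by
  simp only [ne_eq, Prod.mk.injEq, not_and]; intro h; omega

theorem pv_ne2 (nn kk j t : Int) (h1 : 1 ≤ j) (hkk : 1 ≤ kk) :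
    ((nn - j + 1 - kk, t) : Int × Int) ≠ (nn, kk) := by
  simp only [ne_eq, Prod.mk.injEq, not_and]; intro h; omega

theorem pvFt_insert (d : PySem.Dict (Int × Int) Int) (v σ nn kk j s t : Int)
    (h1 : 1 ≤ j) (h2 : j ≤ nn - kk) (hkk : 1 ≤ kk) :
    pvFt (d.insert (nn, kk) v) σ nn kk j s t = pvFt d σ nn kk j s t := by
  unfold pvFt
  rw [pv_get_d_insert_ne d _ v σ _ _ (pv_ne1 nn kk j s h2 hkk),
      pv_get_d_insert_ne d _ v σ _ _ (pv_ne2 nn kk j t h1 hkk)]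

theorem pvFs_insert (d : PySem.Dict (Int × Int) Int) (v σ nn kk j s : Int)
    (h1 : 1 ≤ j) (h2 : j ≤ nn - kk) (hkk : 1 ≤ kk) :
    pvFs (d.insert (nn, kk) v) σ nn kk j s = pvFs d σ nn kk j s := by
  unfold pvFs
  exact congrArg List.sum (List.map_congr_left fun t _ => pvFt_insert d v σ nn kk j s t h1 h2 hkk)

theorem pvFj_insert (d : PySem.Dict (Int × Int) Int) (v σ nn kk j : Int)
    (h1 : 1 ≤ j) (h2 : j ≤ nn - kk) (hkk : 1 ≤ kk) :
    pvFj (d.insert (nn, kk) v) σ nn kk j = pvFj d σ nn kk j := by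
  unfold pvFj
  exact congrArg List.sum (List.map_congr_left fun s _ => pvFs_insert d v σ nn kk j s h1 h2 hkk)

theorem pv_body_zero (σ nn : Int) (d : PySem.Dict (Int × Int) Int) :
    pvA_body σ nn d 0 = d.insert (nn, 0) 0 := by
  unfold pvA_body
  refine (PySem.List.foldl_congr_mem _ _ _ _ fun acc j _ => ?_).trans
    (PySem.List.foldl_ignore _ _)
  rw [show PySem.List.pyRange 0 (min (0 - 1) (j - 2) + 1) 1 = [] from
    PySem.List.pyRange_one_eq_nil (by omega)]
  rfl

theorem pv_body_pos (σ nn kk : Int) (d : PySem.Dict (Int × Int) Int) (hkk : 1 ≤ kk) :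
    pvA_body σ nn d kk = d.insert (nn, kk) (pvSum d σ nn kk) := by
  unfold pvA_body
  refine (pv_fold_collapse (nn, kk) _ _ (fun d j => pvFj d σ nn kk j) ?_ ?_ d 0).trans ?_
  · intro e b j hj
    rw [PySem.List.mem_pyRange_one] at hj
    refine (pv_fold_collapse (nn, kk) _ _ (fun d s => pvFs d σ nn kk j s) ?_ ?_ e b).trans ?_
    · intro e' b' s _
      refine (pv_fold_collapse (nn, kk) _ _ (fun d t => pvFt d σ nn kk j s t) ?_ ?_ e' b').trans ?_
      · intro e'' b'' t _
        show (e''.insert (nn, kk) b'').insert (nn, kk)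
            ((e''.insert (nn, kk) b'').getD (nn, kk) 0 + _) = _
        rw [PySem.Dict.getD_insert_self, PySem.Dict.insert_insert_self]
        rfl
      · intro d' v t _
        exact pvFt_insert d' v σ nn kk j s t (by omega) (by omega) hkk
      · rfl
    · intro d' v s _
      exact pvFs_insert d' v σ nn kk j s (by omega) (by omega) hkk
    · rfl
  · intro d' v j hj
    rw [PySem.List.mem_pyRange_one] at hj
    exact pvFj_insert d' v σ nn kk j (by omega) (by omega) hkk
  · rw [zero_add]
    congr 1
    exact congrArg List.sum (List.map_congr_left fun j hj => by
      rw [PySem.List.mem_pyRange_one] at hj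
      exact pvFj_insert d 0 σ nn kk j (by omega) (by omega) hkk)

theorem pvSum_congr (d d' : PySem.Dict (Int × Int) Int) (σ nn kk : Int) (hkk : 1 ≤ kk)
    (h : ∀ p q : Int, p ≠ nn → d.getD (p, q) 0 = d'.getD (p, q) 0) :
    pvSum d σ nn kk = pvSum d' σ nn kk := by
  unfold pvSum
  refine congrArg List.sum (List.map_congr_left fun j hj => ?_)
  rw [PySem.List.mem_pyRange_one] at hj
  unfold pvFj
  refine congrArg List.sum (List.map_congr_left fun s _ => ?_)
  unfold pvFs
  refine congrArg List.sum (List.map_congr_left fun t _ => ?_)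
  unfold pvFt
  rw [pv_get_d_congr d d' σ (j - 1) s (h _ _ (by omega)),
      pv_get_d_congr d d' σ (nn - j + 1 - kk) t (h _ _ (by omega))]

-- A's whole kk-loop: rows below nn untouched, entry (nn,kk) holds the triple sum
theorem pv_kkloop (σ nn : Int) (d : PySem.Dict (Int × Int) Int) (K : Int)
    (h0 : 0 ≤ K) :
    (∀ p q : Int, p ≠ nn →
      ((PySem.List.pyRange 0 K 1).foldl (pvA_body σ nn) d).getD (p, q) 0 = d.getD (p, q) 0) ∧
    (∀ kk : Int, 1 ≤ kk → kk < K →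
      ((PySem.List.pyRange 0 K 1).foldl (pvA_body σ nn) d).getD (nn, kk) 0 = pvSum d σ nn kk) := by
  induction K, h0 using Int.le_induction with
  | base =>
    rw [PySem.List.pyRange_one_eq_nil le_rfl]
    exact ⟨fun p q _ => rfl, fun kk h1 h2 => absurd h2 (by omega)⟩
  | succ K hK ih =>
    obtain ⟨ih1, ih2⟩ := ih
    rw [PySem.List.pyRange_one_succ_right hK, List.foldl_append, List.foldl_cons, List.foldl_nil]
    by_cases hK0 : K = 0
    · subst hK0
      rw [pv_body_zero]
      refine ⟨fun p q hp => ?_, fun kk h1 h2 => absurd h1 (by omega)⟩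
      rw [PySem.Dict.getD_insert_of_ne _ _ _ (by simp only [ne_eq, Prod.mk.injEq, not_and]; intro h; omega)]
      exact ih1 p q hp
    · have hK1 : (1 : Int) ≤ K := by omega
      rw [pv_body_pos σ nn K _ hK1]
      constructor
      · intro p q hp
        rw [PySem.Dict.getD_insert_of_ne _ _ _ (by simp only [ne_eq, Prod.mk.injEq, not_and]; intro h; omega)]
        exact ih1 p q hp
      · intro kk h1 h2
        by_cases hkkK : kk = K
        · subst hkkK
          rw [PySem.Dict.getD_insert_self]
          exact pvSum_congr _ d σ nn kk hK1 ih1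
        · rw [PySem.Dict.getD_insert_of_ne _ _ _ (by simp only [ne_eq, Prod.mk.injEq, not_and]; intro h; omega)]
          exact ih2 kk h1 (by omega)

-- ----- B-side helpers -----

theorem pv_prefix_gen (row : List Int) (a : Int) (acc : List Int) :
    (row.foldl (fun (p : Int × List Int) v => (p.1 + v, p.2 ++ [p.1 + v])) (a, acc)).2
      = acc ++ (List.range row.length).map (fun i => a + (row.take (i + 1)).sum) := by
  induction row generalizing a acc with
  | nil => simp
  | cons v rest ih =>
    simp only [List.foldl_cons]
    rw [ih]
    simp [List.range_succ_eq_map, List.map_map, Function.comp, add_assoc]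

theorem pv_prefix_eq (row : List Int) :
    pv_prefix row = (List.range row.length).map (fun i => (row.take (i + 1)).sum) := by
  unfold pv_prefix
  rw [pv_prefix_gen row 0 []]
  simp

theorem pv_prefix_getD (row : List Int) (c : Nat) (hc : c < row.length) :
    PySem.List.pyGetD (pv_prefix row) (c : Int) 0 = (row.take (c + 1)).sum := by
  rw [PySem.List.pyGetD_natCast, pv_prefix_eq]
  exact PySem.List.getD_map_range _ _ _ _ hc

theorem pv_sum_pyGetD (row : List Int) (c : Nat) (hc : c ≤ row.length) :
    ((PySem.List.pyRange 0 (c : Int) 1).map (fun i => PySem.List.pyGetD row i 0)).sum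
      = (row.take c).sum := by
  induction c with
  | zero => simp [PySem.List.pyRange_one_eq_nil le_rfl]
  | succ c ih =>
    rw [show ((c + 1 : Nat) : Int) = (c : Int) + 1 by push_cast; ring,
        PySem.List.pyRange_one_succ_right (by positivity), List.map_append, List.sum_append,
        ih (by omega)]
    simp only [List.map_cons, List.map_nil, List.sum_cons, List.sum_nil, add_zero,
      PySem.List.pyGetD_natCast]
    rw [List.sum_take_succ _ _ (by omega), List.getD_eq_getElem _ _ (by omega)]

-- B's summand: the prefix-sum product
def pvT (prefs : PySem.Dict Int (List Int)) (nn kk : Int) : Int → Int :=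
  fun j => pv_P prefs (j - 1) (min (kk - 1) (j - 2)) *
           pv_P prefs (nn - j + 1 - kk) (min kk (nn - j + 1 - kk - 1))
def pvTrow (prefs : PySem.Dict Int (List Int)) (nn : Int) : Int → Int :=
  fun kk => ((PySem.List.pyRange 2 (nn - kk + 1) 1).map (pvT prefs nn kk)).sum

def pvB_outer (σ : Int) :
    PySem.Dict Int (List Int) × PySem.Dict Int (List Int) → Int →
    PySem.Dict Int (List Int) × PySem.Dict Int (List Int) :=
  fun st nn =>
    let interior := (PySem.List.pyRange 1 (nn - 1) 1).foldl (fun interior kk =>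
      let total := (PySem.List.pyRange 2 (nn - kk + 1) 1).foldl (fun total j =>
        let m2 := nn - j + 1 - kk
        total + pv_P st.2 (j - 1) (min (kk - 1) (j - 2)) * pv_P st.2 m2 (min kk (m2 - 1))) 0
      interior ++ [total]) []
    pv_makeRow σ st nn interior

theorem pvB_outer_eq (σ : Int) (st : PySem.Dict Int (List Int) × PySem.Dict Int (List Int))
    (nn : Int) :
    pvB_outer σ st nn
      = pv_makeRow σ st nn ((PySem.List.pyRange 1 (nn - 1) 1).map (pvTrow st.2 nn)) := by
  simp only [pvB_outer]
  congr 1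
  rw [PySem.List.foldl_append_singleton_eq_map, List.nil_append]
  refine List.map_congr_left fun kk _ => ?_
  rw [PySem.List.foldl_add, zero_add]
  rfl

-- ----- the joint invariant -----

def pvInv (σ N : Int) (matrix : PySem.Dict (Int × Int) Int)
    (rows prefs : PySem.Dict Int (List Int)) : Prop :=
  (∀ m : Int, 1 ≤ m → m ≤ N → (rows.getD m []).length = m.toNat) ∧
  (∀ m : Int, 1 ≤ m → m ≤ N → prefs.getD m [] = pv_prefix (rows.getD m [])) ∧
  (∀ m k : Int, 1 ≤ m → m ≤ N → 0 ≤ k → k < m →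
    get_d matrix σ m k = PySem.List.pyGetD (rows.getD m []) k 0)

-- pv_P is the partial row sum of get_d values, under the invariant
theorem pv_P_eq (σ N : Int) (matrix : PySem.Dict (Int × Int) Int)
    (rows prefs : PySem.Dict Int (List Int)) (hInv : pvInv σ N matrix rows prefs)
    (m c : Int) (hm1 : 1 ≤ m) (hmN : m ≤ N) (hc0 : 0 ≤ c) (hcm : c ≤ m - 1) :
    pv_P prefs m c = ((PySem.List.pyRange 0 (c + 1) 1).map (fun i => get_d matrix σ m i)).sum := by
  obtain ⟨hlen, hpref, hval⟩ := hInv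
  unfold pv_P
  rw [if_neg (by omega), hpref m hm1 hmN,
      show c = ((c.toNat : Nat) : Int) from (Int.toNat_of_nonneg hc0).symm,
      pv_prefix_getD _ _ (by rw [hlen m hm1 hmN]; omega),
      ← pv_sum_pyGetD _ (c.toNat + 1) (by rw [hlen m hm1 hmN]; omega),
      show ((c.toNat + 1 : Nat) : Int) = ((c.toNat : Nat) : Int) + 1 by push_cast; ring]
  refine congrArg List.sum (List.map_congr_left fun i hi => ?_)
  rw [PySem.List.mem_pyRange_one] at hi
  exact (hval m i hm1 hmN (by omega) (by omega)).symm

-- the factorization: A's triple sum = B's sum of prefix-sum products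
theorem pv_factor (σ N : Int) (matrix : PySem.Dict (Int × Int) Int)
    (rows prefs : PySem.Dict Int (List Int)) (hInv : pvInv σ N matrix rows prefs)
    (kk : Int) (hkk1 : 1 ≤ kk) (hkk2 : kk ≤ N - 1) :
    pvSum matrix σ (N + 1) kk = pvTrow prefs (N + 1) kk := by
  unfold pvSum pvTrow
  rw [PySem.List.pyRange_one_cons (by omega), List.map_cons, List.sum_cons,
      show pvFj matrix σ (N + 1) kk 1 = 0 by
        unfold pvFj
        rw [show PySem.List.pyRange 0 (min (kk - 1) (1 - 2) + 1) 1 = [] from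
          PySem.List.pyRange_one_eq_nil (by omega)]
        rfl,
      zero_add, show (1 : Int) + 1 = 2 from rfl]
  refine congrArg List.sum (List.map_congr_left fun j hj => ?_)
  rw [PySem.List.mem_pyRange_one] at hj
  unfold pvFj pvT
  rw [pv_P_eq σ N matrix rows prefs ⟨hInv.1, hInv.2.1, hInv.2.2⟩ (j - 1) _
        (by omega) (by omega) (by omega) (by omega),
      pv_P_eq σ N matrix rows prefs ⟨hInv.1, hInv.2.1, hInv.2.2⟩ (N + 1 - j + 1 - kk) _
        (by omega) (by omega) (by omega) (by omega)]
  have hs : ∀ s : Int, pvFs matrix σ (N + 1) kk j s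
      = get_d matrix σ (j - 1) s *
        ((PySem.List.pyRange 0 (min kk (N + 1 - j - kk) + 1) 1).map
          (fun t => get_d matrix σ (N + 1 - j + 1 - kk) t)).sum := fun s => by
    unfold pvFs pvFt
    exact PySem.List.sum_map_const_mul_int _ _ _
  rw [congrArg List.sum (List.map_congr_left fun s _ => hs s), List.sum_map_mul_right,
      show min kk (N + 1 - j + 1 - kk - 1) = min kk (N + 1 - j - kk) by omega]

theorem pv_step (σ N : Int) (hN : 2 ≤ N) (matrix : PySem.Dict (Int × Int) Int)
    (rows prefs : PySem.Dict Int (List Int)) (hInv : pvInv σ N matrix rows prefs) :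
    pvInv σ (N + 1) (pvA_outer σ matrix (N + 1))
      (pvB_outer σ (rows, prefs) (N + 1)).1 (pvB_outer σ (rows, prefs) (N + 1)).2 := by
  obtain ⟨hlen, hpref, hval⟩ := hInv
  rw [pvB_outer_eq]
  obtain ⟨hA1, hA2⟩ := pv_kkloop σ (N + 1) matrix (N + 1 - 1) (by omega)
  set interior := (PySem.List.pyRange 1 (N + 1 - 1) 1).map (pvTrow (rows, prefs).2 (N + 1))
    with hint
  have hlen_int : interior.length = (N - 1).toNat := by
    rw [hint, List.length_map, PySem.List.length_pyRange_one]
    omega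
  have hrowget : ((pv_makeRow σ (rows, prefs) (N + 1) interior).1).getD (N + 1) []
      = pv_row σ (N + 1) interior := by
    simp only [pv_makeRow]
    exact PySem.Dict.getD_insert_self _ _ _ _
  have hrowexp : pv_row σ (N + 1) interior
      = (σ - 1) ^ (N + 1).toNat :: (interior ++ [0]) := by
    unfold pv_row
    rw [if_neg (by omega), if_neg (by omega)]
  have hrowlen : (pv_row σ (N + 1) interior).length = (N + 1).toNat := by
    rw [hrowexp]
    simp [hlen_int]
    omega
  refine ⟨?_, ?_, ?_⟩
  · intro m h1 h2
    by_cases hm : m = N + 1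
    · subst hm
      rw [hrowget, hrowlen]
    · simp only [pv_makeRow]
      rw [PySem.Dict.getD_insert_of_ne _ _ _ hm]
      exact hlen m h1 (by omega)
  · intro m h1 h2
    by_cases hm : m = N + 1
    · subst hm
      rw [hrowget]
      simp only [pv_makeRow]
      exact PySem.Dict.getD_insert_self _ _ _ _
    · simp only [pv_makeRow]
      rw [PySem.Dict.getD_insert_of_ne _ _ _ hm, PySem.Dict.getD_insert_of_ne _ _ _ hm]
      exact hpref m h1 (by omega)
  · intro m k h1 h2 hk0 hkm
    by_cases hm : m = N + 1
    · subst hm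
      rw [hrowget, hrowexp]
      have hclen : k < ((((σ - 1) ^ (N + 1).toNat :: (interior ++ [0])).length : Nat) : Int) := by
        simp only [List.length_cons, List.length_append, hlen_int]
        push_cast
        omega
      by_cases hk00 : k = 0
      · subst hk00
        rw [show get_d (pvA_outer σ matrix (N + 1)) σ (N + 1) 0 = (σ - 1) ^ (N + 1).toNat by
              unfold get_d
              rw [if_neg (by omega), if_neg (by omega), if_neg (by omega), if_pos rfl],
            PySem.List.pyGetD_zero_cons]
      · by_cases hklast : k = N + 1 - 1
        · rw [show get_d (pvA_outer σ matrix (N + 1)) σ (N + 1) k = 0 by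
                unfold get_d
                rw [if_neg (by omega), if_neg (by omega), if_pos hklast],
              PySem.List.pyGetD_eq_getElem _ _ (by omega) hclen]
          have hidx : k.toNat = interior.length + 1 := by
            rw [hlen_int]; omega
          simp only [hidx, List.getElem_cons_succ, List.getElem_concat_length]
        · -- 1 ≤ k ≤ N - 1 : the interior entry
          have hget : get_d (pvA_outer σ matrix (N + 1)) σ (N + 1) k
              = (pvA_outer σ matrix (N + 1)).getD (N + 1, k) 0 := by
            unfold get_d
            rw [if_neg (by omega), if_neg (by omega), if_neg (by omega), if_neg (by omega)]
          rw [hget]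
          have hsum : (pvA_outer σ matrix (N + 1)).getD (N + 1, k) 0
              = pvSum matrix σ (N + 1) k := hA2 k (by omega) (by omega)
          rw [hsum, pv_factor σ N matrix rows prefs ⟨hlen, hpref, hval⟩ k (by omega) (by omega)]
          rw [PySem.List.pyGetD_eq_getElem _ _ (by omega) hclen]
          have hidx : k.toNat = (k - 1).toNat + 1 := by omega
          simp only [hidx, List.getElem_cons_succ]
          rw [List.getElem_append_left (by rw [hlen_int]; omega)]
          simp only [hint, List.getElem_map, PySem.List.getElem_pyRange_one]
          congr 1
          omega
    · have hAeq : get_d (pvA_outer σ matrix (N + 1)) σ m k = get_d matrix σ m k :=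
        pv_get_d_congr _ _ _ _ _ (hA1 m k (by omega))
      rw [hAeq]
      simp only [pv_makeRow]
      rw [PySem.Dict.getD_insert_of_ne _ _ _ hm]
      exact hval m k h1 (by omega) hk0 hkm

theorem pv_loop (σ : Int) (cnt : Nat) :
    ∀ (N : Int) (matrix : PySem.Dict (Int × Int) Int)
      (rows prefs : PySem.Dict Int (List Int)), 2 ≤ N → pvInv σ N matrix rows prefs →
    pvInv σ (N + cnt) ((PySem.List.pyRange (N + 1) (N + 1 + cnt) 1).foldl (pvA_outer σ) matrix)
      ((PySem.List.pyRange (N + 1) (N + 1 + cnt) 1).foldl (pvB_outer σ) (rows, prefs)).1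
      ((PySem.List.pyRange (N + 1) (N + 1 + cnt) 1).foldl (pvB_outer σ) (rows, prefs)).2 := by
  induction cnt with
  | zero =>
    intro N matrix rows prefs hN hInv
    rw [PySem.List.pyRange_one_eq_nil (by push_cast; omega)]
    simpa using hInv
  | succ c ih =>
    intro N matrix rows prefs hN hInv
    have hcons : PySem.List.pyRange (N + 1) (N + 1 + ((c + 1 : Nat) : Int)) 1
        = (N + 1) :: PySem.List.pyRange (N + 1 + 1) (N + 1 + ((c + 1 : Nat) : Int)) 1 :=
      PySem.List.pyRange_one_cons (by push_cast; omega)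
    rw [hcons]
    simp only [List.foldl_cons]
    have hstep := pv_step σ N hN matrix rows prefs hInv
    have := ih (N + 1) (pvA_outer σ matrix (N + 1))
      (pvB_outer σ (rows, prefs) (N + 1)).1 (pvB_outer σ (rows, prefs) (N + 1)).2
      (by omega) hstep
    rw [show N + 1 + 1 = (N + 1) + 1 from rfl,
        show N + 1 + ((c + 1 : Nat) : Int) = (N + 1) + 1 + ((c : Nat) : Int) by push_cast; ring,
        show N + ((c + 1 : Nat) : Int) = (N + 1) + ((c : Nat) : Int) by push_cast; ring]
    exact this

theorem pv_base (σ : Int) :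
    pvInv σ 2 PySem.Dict.empty
      (pv_makeRow σ (pv_makeRow σ (PySem.Dict.empty, PySem.Dict.empty) 1 []) 2 []).1
      (pv_makeRow σ (pv_makeRow σ (PySem.Dict.empty, PySem.Dict.empty) 1 []) 2 []).2 := by
  have hrow1 : pv_row σ 1 [] = [σ - 1] := by unfold pv_row; rw [if_pos rfl]
  have hrow2 : pv_row σ 2 [] = [(σ - 1) ^ 2, 0] := by
    unfold pv_row; rw [if_neg (by omega), if_pos rfl]
  refine ⟨?_, ?_, ?_⟩
  · intro m h1 h2
    have hm : m = 1 ∨ m = 2 := by omega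
    rcases hm with hm | hm <;> subst hm <;>
      simp [pv_makeRow, PySem.Dict.getD_insert, hrow1, hrow2]
  · intro m h1 h2
    have hm : m = 1 ∨ m = 2 := by omega
    rcases hm with hm | hm <;> subst hm <;>
      simp [pv_makeRow, PySem.Dict.getD_insert, hrow1, hrow2]
  · intro m k h1 h2 hk0 hkm
    have hm : m = 1 ∨ m = 2 := by omega
    rcases hm with hm | hm <;> subst hm
    · have hk : k = 0 := by omega
      subst hk
      simp [pv_makeRow, PySem.Dict.getD_insert, hrow1, hrow2, get_d]
    · have hk : k = 0 ∨ k = 1 := by omega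
      rcases hk with hk | hk <;> subst hk <;>
        simp [pv_makeRow, hrow1, hrow2, get_d, PySem.List.pyGetD_ofNat']


-- ===== VERDICT (by name: the statement is the Claim_ definition above) =====
theorem pv_calc_a (n σ : Int) :
    calculate_d n σ = (PySem.List.pyRange 0 n 1).foldl (fun res kk =>
      res ++ [get_d ((PySem.List.pyRange 3 (n + 1) 1).foldl (pvA_outer σ) PySem.Dict.empty)
        σ n kk]) [] := rfl

theorem pv_calc_b (n σ : Int) :
    calculate_d_alt n σ =
      (if n ≤ 0 then [] else
        ((PySem.List.pyRange 3 (n + 1) 1).foldl (pvB_outer σ)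
          (if 2 ≤ n then
            pv_makeRow σ (if 1 ≤ n then pv_makeRow σ (PySem.Dict.empty, PySem.Dict.empty) 1 []
              else (PySem.Dict.empty, PySem.Dict.empty)) 2 []
           else (if 1 ≤ n then pv_makeRow σ (PySem.Dict.empty, PySem.Dict.empty) 1 []
              else (PySem.Dict.empty, PySem.Dict.empty)))).1.getD n []) := rfl

theorem calculate_d_spec : Claim_equal_calculate_d := by
  intro n σ _
  unfold Spec_calculate_d
  by_cases hn : n ≤ 0
  · -- n ≤ 0 : both return []
    rw [pv_calc_a, pv_calc_b, if_pos hn, PySem.List.pyRange_one_eq_nil hn, List.foldl_nil]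
  by_cases hn1 : n = 1
  · -- n = 1
    subst hn1
    rw [pv_calc_a, pv_calc_b, if_neg (by omega), if_neg (by omega), if_pos (by omega),
        show PySem.List.pyRange 3 (1 + 1) 1 = [] from PySem.List.pyRange_one_eq_nil (by omega),
        show PySem.List.pyRange 0 1 1 = [0] from by decide]
    simp only [List.foldl_cons, List.foldl_nil, List.nil_append, pv_makeRow]
    rw [PySem.Dict.getD_insert_self]
    unfold get_d pv_row
    rw [if_pos (by omega), if_pos rfl]
  by_cases hn2 : n = 2
  · -- n = 2
    subst hn2
    rw [pv_calc_a, pv_calc_b, if_neg (by omega), if_pos (by omega), if_pos (by omega),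
        show PySem.List.pyRange 3 (2 + 1) 1 = [] from PySem.List.pyRange_one_eq_nil (by omega),
        show PySem.List.pyRange 0 2 1 = [0, 1] from by decide]
    simp only [List.foldl_cons, List.foldl_nil, List.nil_append, pv_makeRow]
    rw [PySem.Dict.getD_insert_self]
    unfold get_d pv_row
    rw [if_neg (by omega), if_pos (by omega), if_neg (by omega), if_neg (by omega),
        if_pos (by omega), if_neg (by omega), if_pos rfl]
    rfl
  -- 3 ≤ n
  have hn3 : (3 : Int) ≤ n := by omega
  have hbase := pv_base σ
  have hloop := pv_loop σ (n - 2).toNat 2 PySem.Dict.empty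
    (pv_makeRow σ (pv_makeRow σ (PySem.Dict.empty, PySem.Dict.empty) 1 []) 2 []).1
    (pv_makeRow σ (pv_makeRow σ (PySem.Dict.empty, PySem.Dict.empty) 1 []) 2 []).2
    (by omega) hbase
  rw [show (2 : Int) + 1 + (((n - 2).toNat : Nat) : Int) = n + 1 by omega,
      show (2 : Int) + (((n - 2).toNat : Nat) : Int) = n by omega,
      show (2 : Int) + 1 = 3 from rfl] at hloop
  obtain ⟨hlen, hpref, hval⟩ := hloop
  rw [pv_calc_a, pv_calc_b, if_neg (by omega), if_pos (by omega), if_pos (by omega),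
      PySem.List.foldl_append_singleton_eq_map, List.nil_append]
  refine Eq.trans (List.map_congr_left
    (g := fun kk => PySem.List.pyGetD (((PySem.List.pyRange 3 (n + 1) 1).foldl (pvB_outer σ)
      ((pv_makeRow σ (pv_makeRow σ (PySem.Dict.empty, PySem.Dict.empty) 1 []) 2 []).1,
       (pv_makeRow σ (pv_makeRow σ (PySem.Dict.empty, PySem.Dict.empty) 1 []) 2 []).2)).1.getD
        n []) kk 0)
    (fun kk hkk => ?_)) ?_
  · rw [PySem.List.mem_pyRange_one] at hkk
    exact hval n kk (by omega) le_rfl (by omega) (by omega)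
  have hlenn : ((((PySem.List.pyRange 3 (n + 1) 1).foldl (pvB_outer σ)
      ((pv_makeRow σ (pv_makeRow σ (PySem.Dict.empty, PySem.Dict.empty) 1 []) 2 []).1,
       (pv_makeRow σ (pv_makeRow σ (PySem.Dict.empty, PySem.Dict.empty) 1 []) 2 []).2)).1.getD
        n []).length : Int) = n := by
    rw [hlen n (by omega) le_rfl]
    omega
  have E := PySem.List.map_pyGetD_pyRange_zero'
    (((PySem.List.pyRange 3 (n + 1) 1).foldl (pvB_outer σ)
      ((pv_makeRow σ (pv_makeRow σ (PySem.Dict.empty, PySem.Dict.empty) 1 []) 2 []).1,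
       (pv_makeRow σ (pv_makeRow σ (PySem.Dict.empty, PySem.Dict.empty) 1 []) 2 []).2)).1.getD
        n []) (0 : Int)
  rw [hlenn] at E
  exact E
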